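-- pv_equiv track=rewrite | github.com/Onoiro/python-project-49 | brain_games/find_number.py | get_progression
-- ===== SOURCE A (Python) =====
-- def get_progression(first_number, operator, prog_step):
--
--     progression = []
--     for i in range(1, 8):
--         if operator == 1:
--             prog_number = first_number + prog_step
--             first_number = first_number + prog_step
--             progression.append(prog_number)
--         elif operator == 2:
--             prog_number = first_number * prog_step
--             first_number = first_number * prog_step
--             progression.append(prog_number)
--
--     return progression
-- ===== SOURCE B (Python) =====
-- def get_progression(first_number, operator, prog_step):
--     if operator == 1:
--         return [first_number + k * prog_step for k in range(1, 8)]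
--     if operator == 2:
--         return [first_number * prog_step ** k for k in range(1, 8)]
--     return []
-- ===== Notes on version B (the rewrite author's own statement) =====
-- stated objective: alternative
-- what changed: Replaces the stateful accumulation loop by a closed form: term k is computed independently as first_number + k*prog_step (add) or first_number * prog_step**k (mul), mapped over range(1,8), with the operator dispatched once up front.
import Mathlib
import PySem

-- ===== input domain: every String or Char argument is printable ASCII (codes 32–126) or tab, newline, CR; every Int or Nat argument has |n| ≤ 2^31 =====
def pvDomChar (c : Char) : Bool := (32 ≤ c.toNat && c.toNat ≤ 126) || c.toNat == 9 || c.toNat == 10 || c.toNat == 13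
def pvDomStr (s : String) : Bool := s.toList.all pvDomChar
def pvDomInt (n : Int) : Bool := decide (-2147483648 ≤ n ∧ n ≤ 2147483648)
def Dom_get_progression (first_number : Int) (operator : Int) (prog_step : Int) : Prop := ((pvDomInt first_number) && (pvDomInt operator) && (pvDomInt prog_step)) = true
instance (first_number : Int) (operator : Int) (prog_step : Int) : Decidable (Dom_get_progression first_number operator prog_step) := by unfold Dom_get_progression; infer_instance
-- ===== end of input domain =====

-- B replaces A's stateful accumulation loop with independent closed-form terms; equal cost, different shape.

-- ===== PORT A =====
-- A: loop over range(1,8) carrying (first_number, progression); branch on operator each iteration.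
def get_progression (first_number : Int) (operator : Int) (prog_step : Int) : List Int :=
  ((PySem.List.pyRange 1 8 1).foldl
    (fun (st : Int × List Int) _ =>
      if operator == 1 then (st.1 + prog_step, st.2 ++ [st.1 + prog_step])
      else if operator == 2 then (st.1 * prog_step, st.2 ++ [st.1 * prog_step])
      else st)
    (first_number, [])).2

-- ===== PORT B =====
-- B: dispatch on operator once; each term is a closed form in its index k (map over range(1,8)).
def get_progression_alt (first_number : Int) (operator : Int) (prog_step : Int) : List Int :=
  if operator == 1 then
    (PySem.List.pyRange 1 8 1).map (fun k => first_number + k * prog_step)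
  else if operator == 2 then
    (PySem.List.pyRange 1 8 1).map (fun k => first_number * prog_step ^ k.toNat)
  else []

-- ===== PRECONDITION & SPEC =====
def Spec_get_progression (first_number : Int) (operator : Int) (prog_step : Int) (out : List Int) : Prop := out = get_progression_alt first_number operator prog_step
instance (first_number : Int) (operator : Int) (prog_step : Int) (out : List Int) : Decidable (Spec_get_progression first_number operator prog_step out) := by unfold Spec_get_progression; infer_instance

-- ===== CLAIM =====
def Claim_equal_get_progression : Prop := ∀ (first_number : Int) (operator : Int) (prog_step : Int), Dom_get_progression first_number operator prog_step → Spec_get_progression first_number operator prog_step (get_progression first_number operator prog_step)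

-- ===== LEMMAS AND PROOFS =====

-- ===== VERDICT =====
theorem get_progression_spec : Claim_equal_get_progression := by
  intro f op s _
  unfold Spec_get_progression get_progression get_progression_alt
  by_cases h1 : op = 1
  · subst h1
    simp [PySem.List.pyRange, List.range_succ]
    ring_nf
    simp
  · by_cases h2 : op = 2
    · subst h2
      simp [PySem.List.pyRange, List.range_succ, Int.toNat]
      ring_nf
      simp
    · simp [PySem.List.pyRange, List.range_succ, h1, h2]
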